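-- pv_equiv track=rewrite | github.com/ccolas/rl_stats | distributions.py | get_distribution_pairs
-- ===== SOURCE A (Python) =====
-- distributions_list = ['normal', 'lognormal', 'bimod', 'td3', 'sac']
--
-- def get_distribution_pairs(study, distributions_pair_idx):
--     """
--     Get str ids for distribution to compare in a given study. Set the std_ratio depending on the study.
--     :param study: (str) describes the current study
--     :param distributions_pair_idx: (list of tuples) each element is a tuple describing the index of the two
--         distributions to compare.
--     :return: list of tuples. Each tuple is of size two, contains the two string ids of two distributions
--         to compare.
--     """
--     if study == 'equal_dist_equal_var':
--         distrib_list = []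
--         for distrib in distributions_list:
--             distrib_list.append((distrib, distrib))
--         std_ratio = ('single', 'single')
--     elif study == 'equal_dist_unequal_var':
--         distrib_list = []
--         for distrib in distributions_list:
--             distrib_list.append((distrib, distrib))
--         std_ratio = ('single', 'double')
--     elif study == 'unequal_dist_equal_var':
--         distrib_idx = distributions_pair_idx
--         distrib_list = []
--         for idx in distrib_idx:
--             distrib1 = distributions_list[idx[0]]
--             distrib2 = distributions_list[idx[1]]
--             distrib_list.append((distrib1, distrib2))
--         std_ratio = ('single', 'single')
--     elif study == 'unequal_dist_unequal_var_1':
--         distrib_idx = distributions_pair_idx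
--         distrib_list = []
--         for idx in distrib_idx:
--             distrib1 = distributions_list[idx[0]]
--             distrib2 = distributions_list[idx[1]]
--             distrib_list.append((distrib1, distrib2))
--         std_ratio = ('single', 'double')
--     elif study == 'unequal_dist_unequal_var_2':
--         distrib_idx = distributions_pair_idx
--         distrib_list = []
--         for idx in distrib_idx:
--             distrib1 = distributions_list[idx[0]]
--             distrib2 = distributions_list[idx[1]]
--             distrib_list.append((distrib1, distrib2))
--         std_ratio = ('double', 'single')
--     else:
--         raise NotImplementedError
--
--     return distrib_list, std_ratio
-- ===== SOURCE B (Python) =====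
-- distributions_list = ['normal', 'lognormal', 'bimod', 'td3', 'sac']
--
--
-- def _diag_pairs(ds):
--     # recursively pair each distribution with itself
--     if not ds:
--         return []
--     return [(ds[0], ds[0])] + _diag_pairs(ds[1:])
--
--
-- def _lookup_pairs(idx_list):
--     # recursively resolve each index pair to its pair of string ids
--     if not idx_list:
--         return []
--     (i, j), rest = idx_list[0], idx_list[1:]
--     return [(distributions_list[i], distributions_list[j])] + _lookup_pairs(rest)
--
--
-- def get_distribution_pairs(study, distributions_pair_idx):
--     # parse the study name instead of enumerating whole-string cases
--     dist_kind, sep, var_kind = study.partition('_dist_')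
--     if sep:
--         if dist_kind == 'equal':
--             if var_kind == 'equal_var':
--                 return _diag_pairs(distributions_list), ('single', 'single')
--             if var_kind == 'unequal_var':
--                 return _diag_pairs(distributions_list), ('single', 'double')
--         elif dist_kind == 'unequal':
--             if var_kind == 'equal_var':
--                 return _lookup_pairs(distributions_pair_idx), ('single', 'single')
--             if var_kind == 'unequal_var_1':
--                 return _lookup_pairs(distributions_pair_idx), ('single', 'double')
--             if var_kind == 'unequal_var_2':
--                 return _lookup_pairs(distributions_pair_idx), ('double', 'single')
--     raise NotImplementedError
-- ===== Notes on version B (the rewrite author's own statement) =====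
-- stated objective: alternative
-- what changed: B parses the study name with str.partition on '_dist_' and dispatches on the two parsed components, and builds the pair list by structural recursion (front element plus recursive rest) instead of A's five duplicated whole-string branches with imperative append loops.
import Mathlib
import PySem

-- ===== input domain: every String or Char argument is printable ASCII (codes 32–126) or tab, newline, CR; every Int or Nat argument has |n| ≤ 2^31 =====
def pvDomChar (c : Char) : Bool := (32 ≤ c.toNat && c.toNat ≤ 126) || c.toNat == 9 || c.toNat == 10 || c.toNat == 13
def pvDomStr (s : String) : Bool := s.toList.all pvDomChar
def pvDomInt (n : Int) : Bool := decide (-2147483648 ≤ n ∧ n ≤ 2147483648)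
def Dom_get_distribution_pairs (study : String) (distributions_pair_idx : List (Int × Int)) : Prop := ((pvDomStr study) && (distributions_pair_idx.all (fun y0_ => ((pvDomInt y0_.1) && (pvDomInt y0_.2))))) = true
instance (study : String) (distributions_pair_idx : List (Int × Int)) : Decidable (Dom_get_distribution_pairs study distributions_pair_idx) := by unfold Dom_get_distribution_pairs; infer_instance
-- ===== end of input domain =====

-- B parses the study name with partition('_dist_') and builds the pair list by
-- structural recursion, instead of A's five duplicated whole-string branches
-- with append loops (objective: alternative; no speed claim).

-- ===== PORT A =====
def distributions_list : List String := ["normal", "lognormal", "bimod", "td3", "sac"]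

-- distributions_list[i] with Python indexing; Pre_ excludes out-of-range (IndexError)
def pvIdxA (i : Int) : String := (PySem.List.pyGet? distributions_list i).getD ""

def get_distribution_pairs (study : String) (distributions_pair_idx : List (Int × Int)) : (List (String × String)) × (String × String) :=
  if study == "equal_dist_equal_var" then
    (distributions_list.foldl (fun acc d => acc ++ [(d, d)]) [], ("single", "single"))
  else if study == "equal_dist_unequal_var" then
    (distributions_list.foldl (fun acc d => acc ++ [(d, d)]) [], ("single", "double"))
  else if study == "unequal_dist_equal_var" then
    (distributions_pair_idx.foldl (fun acc idx => acc ++ [(pvIdxA idx.1, pvIdxA idx.2)]) [], ("single", "single"))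
  else if study == "unequal_dist_unequal_var_1" then
    (distributions_pair_idx.foldl (fun acc idx => acc ++ [(pvIdxA idx.1, pvIdxA idx.2)]) [], ("single", "double"))
  else if study == "unequal_dist_unequal_var_2" then
    (distributions_pair_idx.foldl (fun acc idx => acc ++ [(pvIdxA idx.1, pvIdxA idx.2)]) [], ("double", "single"))
  else ([], ("", ""))  -- Python: raise NotImplementedError; excluded by Pre_

-- ===== PORT B =====
-- Python str.partition(sep): first occurrence via find, then the two slices (exact on all strings)
def pyPartition (s sep : String) : String × String × String :=
  let i := PySem.Str.find s sep
  if i = -1 then (s, "", "")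
  else (PySem.Str.slice s none (some i), sep,
        PySem.Str.slice s (some (i + (sep.toList.length : Int))) none)

def diagPairs : List String → List (String × String)
  | [] => []
  | d :: rest => (d, d) :: diagPairs rest

def lookupPairs : List (Int × Int) → List (String × String)
  | [] => []
  | (i, j) :: rest =>
      ((PySem.List.pyGet? distributions_list i).getD "",
       (PySem.List.pyGet? distributions_list j).getD "") :: lookupPairs rest

def get_distribution_pairs_alt (study : String) (distributions_pair_idx : List (Int × Int)) : (List (String × String)) × (String × String) :=
  let p := pyPartition study "_dist_"
  if p.2.1 ≠ "" then
    if p.1 = "equal" then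
      if p.2.2 = "equal_var" then (diagPairs distributions_list, ("single", "single"))
      else if p.2.2 = "unequal_var" then (diagPairs distributions_list, ("single", "double"))
      else ([], ("", ""))  -- Python: raise NotImplementedError; excluded by Pre_
    else if p.1 = "unequal" then
      if p.2.2 = "equal_var" then (lookupPairs distributions_pair_idx, ("single", "single"))
      else if p.2.2 = "unequal_var_1" then (lookupPairs distributions_pair_idx, ("single", "double"))
      else if p.2.2 = "unequal_var_2" then (lookupPairs distributions_pair_idx, ("double", "single"))
      else ([], ("", ""))
    else ([], ("", ""))
  else ([], ("", ""))

-- ===== PRECONDITION & SPEC =====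
-- Pre_ excludes only inputs where A raises: an unknown study (NotImplementedError) and,
-- in the index-driven studies, a pair index outside Python range -5..4 (IndexError).
def Pre_get_distribution_pairs (study : String) (distributions_pair_idx : List (Int × Int)) : Prop :=
  study = "equal_dist_equal_var" ∨ study = "equal_dist_unequal_var" ∨
  ((study = "unequal_dist_equal_var" ∨ study = "unequal_dist_unequal_var_1" ∨
    study = "unequal_dist_unequal_var_2") ∧
   ∀ p ∈ distributions_pair_idx, PySem.Raise.InRange 5 p.1 ∧ PySem.Raise.InRange 5 p.2)
instance (study : String) (distributions_pair_idx : List (Int × Int)) : Decidable (Pre_get_distribution_pairs study distributions_pair_idx) := by unfold Pre_get_distribution_pairs; infer_instance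

def pvWitness_get_distribution_pairs : String × (List (Int × Int)) :=
  ("unequal_dist_equal_var", [(0, 1), (-1, 4)])

def Spec_get_distribution_pairs (study : String) (distributions_pair_idx : List (Int × Int)) (out : (List (String × String)) × (String × String)) : Prop := out = get_distribution_pairs_alt study distributions_pair_idx
instance (study : String) (distributions_pair_idx : List (Int × Int)) (out : (List (String × String)) × (String × String)) : Decidable (Spec_get_distribution_pairs study distributions_pair_idx out) := by unfold Spec_get_distribution_pairs; infer_instance

-- ===== CLAIM =====
def Claim_equal_get_distribution_pairs : Prop := ∀ (study : String) (distributions_pair_idx : List (Int × Int)), Dom_get_distribution_pairs study distributions_pair_idx → Pre_get_distribution_pairs study distributions_pair_idx → Spec_get_distribution_pairs study distributions_pair_idx (get_distribution_pairs study distributions_pair_idx)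

-- ===== LEMMAS AND PROOFS =====
theorem flatten_map_lookup (idxs : List (Int × Int)) :
    (idxs.map (fun x => [(pvIdxA x.1, pvIdxA x.2)])).flatten = lookupPairs idxs := by
  induction idxs with
  | nil => rfl
  | cons hd tl ih =>
      cases hd with
      | mk i j =>
          simp only [List.map_cons, List.flatten_cons, List.singleton_append]
          rw [ih]; simp [lookupPairs, pvIdxA]

theorem part1 : pyPartition "equal_dist_equal_var" "_dist_" = ("equal", "_dist_", "equal_var") := by decide
theorem part2 : pyPartition "equal_dist_unequal_var" "_dist_" = ("equal", "_dist_", "unequal_var") := by decide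
theorem part3 : pyPartition "unequal_dist_equal_var" "_dist_" = ("unequal", "_dist_", "equal_var") := by decide
theorem part4 : pyPartition "unequal_dist_unequal_var_1" "_dist_" = ("unequal", "_dist_", "unequal_var_1") := by decide
theorem part5 : pyPartition "unequal_dist_unequal_var_2" "_dist_" = ("unequal", "_dist_", "unequal_var_2") := by decide

-- ===== VERDICT =====
theorem get_distribution_pairs_spec : Claim_equal_get_distribution_pairs := by
  intro study idxs _ hpre
  unfold Spec_get_distribution_pairs
  rcases hpre with h | h | ⟨h | h | h, _⟩ <;> subst h <;>
    simp [get_distribution_pairs, get_distribution_pairs_alt,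
      part1, part2, part3, part4, part5, flatten_map_lookup, distributions_list, diagPairs]
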